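-- pv_equiv track=rewrite | github.com/pg42876/AAB | Aulas/Aula 3/BWT.py | find_ith_occ
-- ===== SOURCE A (Python) =====
-- def find_ith_occ(l, elem, index):
--     j = 0 #Número de vezes que já apareceu
--     k = 0 #Índice que percorre a sequência
--     while k < index and j < len(l):
--         if l[j] == elem:
--             k = k +1
--             if k == index:
--                 return j
--         j += 1
--     return -1
-- ===== SOURCE B (Python) =====
-- def find_ith_occ(l, elem, index):
--     positions = [i for i, x in enumerate(l) if x == elem]
--     if 1 <= index <= len(positions):
--         return positions[index - 1]
--     return -1
-- ===== Notes on version B (the rewrite author's own statement) =====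
-- stated objective: simpler
-- what changed: Replaces the counter-threaded while loop with an occurrence-position table built in one comprehension pass followed by a guarded O(1) lookup.
import Mathlib
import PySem

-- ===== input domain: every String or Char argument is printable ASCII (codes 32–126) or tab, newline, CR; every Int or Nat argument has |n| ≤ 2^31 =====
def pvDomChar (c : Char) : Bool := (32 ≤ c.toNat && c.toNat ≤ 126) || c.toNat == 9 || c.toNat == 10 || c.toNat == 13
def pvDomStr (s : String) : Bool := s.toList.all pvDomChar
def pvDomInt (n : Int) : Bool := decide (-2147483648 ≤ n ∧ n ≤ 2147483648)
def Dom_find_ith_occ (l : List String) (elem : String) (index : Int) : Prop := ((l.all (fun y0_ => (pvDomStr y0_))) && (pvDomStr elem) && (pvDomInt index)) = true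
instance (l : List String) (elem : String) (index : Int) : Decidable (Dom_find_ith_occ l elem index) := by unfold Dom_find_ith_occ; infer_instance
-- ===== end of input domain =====

-- B builds the occurrence-position table in one pass and does a guarded lookup,
-- instead of A's counter-threaded while loop (objective: simpler; same return value everywhere).

-- ===== PORT A =====
-- transliteration of A's while loop: j is the list index, k counts occurrences seen
def findA_loop (l : List String) (elem : String) (index : Int) (j : Nat) (k : Int) : Int :=
  if h : k < index ∧ j < l.length then
    if l[j]'h.2 = elem then
      if k + 1 = index then (j : Int)
      else findA_loop l elem index (j + 1) (k + 1)
    else findA_loop l elem index (j + 1) k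
  else -1
termination_by l.length - j
decreasing_by all_goals omega

def find_ith_occ (l : List String) (elem : String) (index : Int) : Int :=
  findA_loop l elem index 0 0

-- ===== PORT B =====
def find_ith_occ_alt (l : List String) (elem : String) (index : Int) : Int :=
  let positions : List Int :=
    ((PySem.List.enumerate l 0).filter (fun p => p.2 == elem)).map (fun p => p.1)
  if 1 ≤ index ∧ index ≤ positions.length then
    (PySem.List.pyGet? positions (index - 1)).getD (-1)
  else -1

-- ===== PRECONDITION & SPEC =====
def Spec_find_ith_occ (l : List String) (elem : String) (index : Int) (out : Int) : Prop := out = find_ith_occ_alt l elem index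
instance (l : List String) (elem : String) (index : Int) (out : Int) : Decidable (Spec_find_ith_occ l elem index out) := by unfold Spec_find_ith_occ; infer_instance

-- ===== CLAIM (what is proved, stated in full; the proofs are below) =====
def Claim_equal_find_ith_occ : Prop := ∀ (l : List String) (elem : String) (index : Int), Dom_find_ith_occ l elem index → Spec_find_ith_occ l elem index (find_ith_occ l elem index)

-- ===== LEMMAS AND PROOFS =====

-- proof-side spec: list of indices (ascending) at which elem occurs
def occPos (l : List String) (elem : String) : List Nat :=
  match l with
  | [] => []
  | x :: xs => if x = elem then 0 :: (occPos xs elem).map (· + 1) else (occPos xs elem).map (· + 1)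

theorem findA_loop_eq (elem : String) (index : Int) :
    ∀ (n : Nat) (l : List String) (j : Nat) (k : Int), l.length - j ≤ n → k < index →
      findA_loop l elem index j k =
        (match (occPos (l.drop j) elem)[(index - k - 1).toNat]? with
         | some m => ((j + m : Nat) : Int)
         | none => -1) := by
  intro n
  induction n with
  | zero =>
    intro l j k hn hk
    have hj : l.length ≤ j := by omega
    rw [findA_loop, dif_neg (by omega : ¬ (k < index ∧ j < l.length))]
    simp [List.drop_eq_nil_of_le hj, occPos]
  | succ n ih =>
    intro l j k hn hk
    by_cases hj : j < l.length
    · have hdrop : l.drop j = l[j] :: l.drop (j + 1) := List.drop_eq_getElem_cons hj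
      rw [findA_loop, dif_pos ⟨hk, hj⟩]
      by_cases he : l[j] = elem
      · rw [if_pos he]
        by_cases hlast : k + 1 = index
        · have ht : (index - k - 1).toNat = 0 := by omega
          rw [if_pos hlast]
          simp [hdrop, occPos, he, ht]
        · rw [if_neg hlast]
          rw [ih l (j + 1) (k + 1) (by omega) (by omega)]
          have ht : (index - k - 1).toNat = ((index - (k + 1) - 1).toNat) + 1 := by omega
          rw [hdrop]
          simp only [occPos, he, if_pos, ht, List.getElem?_cons_succ, List.getElem?_map]
          cases hx : (occPos (l.drop (j + 1)) elem)[(index - (k + 1) - 1).toNat]? with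
          | none => simp
          | some m => simp; ring
      · rw [if_neg he]
        rw [ih l (j + 1) k (by omega) hk]
        rw [hdrop]
        simp only [occPos, he, if_false, List.getElem?_map]
        cases hx : (occPos (l.drop (j + 1)) elem)[(index - k - 1).toNat]? with
        | none => simp
        | some m => simp; ring
    · rw [findA_loop, dif_neg (by omega : ¬ (k < index ∧ j < l.length))]
      simp [List.drop_eq_nil_of_le (by omega : l.length ≤ j), occPos]

theorem positions_eq (elem : String) :
    ∀ (l : List String) (s : Int),
      ((PySem.List.enumerate l s).filter (fun p => p.2 == elem)).map (fun p => p.1)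
        = (occPos l elem).map (fun m : Nat => s + (m : Int)) := by
  intro l
  induction l with
  | nil => intro s; simp [PySem.List.enumerate_nil, occPos]
  | cons x xs ih =>
    intro s
    rw [PySem.List.enumerate_cons, occPos]
    by_cases he : x = elem
    · have hbe : (x == elem) = true := by simp [he]
      rw [List.filter_cons, if_pos (by simpa using hbe), if_pos he, List.map_cons, ih,
        List.map_cons, List.map_map]
      refine congrArg₂ _ (by simp) (List.map_congr_left ?_)
      intro m _; simp; ring
    · have hbe : (x == elem) = false := by simp [he]
      rw [List.filter_cons, if_neg (by simp [hbe]), if_neg he, ih, List.map_map]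
      refine List.map_congr_left ?_
      intro m _; simp; ring

-- ===== VERDICT (by name: the statement is the Claim_ definition above) =====
theorem find_ith_occ_spec : Claim_equal_find_ith_occ := by
  intro l elem index _
  unfold Spec_find_ith_occ find_ith_occ find_ith_occ_alt
  rw [positions_eq]
  by_cases hpos : 1 ≤ index
  · rw [findA_loop_eq elem index l.length l 0 0 (by omega) (by omega)]
    simp only [List.drop_zero, Int.sub_zero]
    by_cases hle : index ≤ (occPos l elem).length
    · rw [if_pos ⟨hpos, by simpa using hle⟩]
      have hidx : (index - 1).toNat < (occPos l elem).length := by omega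
      have hc : (index - 1) = (((index - 1).toNat : Nat) : Int) := by omega
      rw [hc, PySem.List.pyGet?_natCast]
      simp only [List.getElem?_map, Int.toNat_natCast]
      cases hx : (occPos l elem)[(index - 1).toNat]? with
      | none => simp
      | some m => simp
    · rw [if_neg (by simp only [List.length_map]; push Not; intro h; omega)]
      rw [List.getElem?_eq_none (by omega)]
  · rw [findA_loop, dif_neg (by omega : ¬ ((0:Int) < index ∧ 0 < l.length))]
    rw [if_neg (by push Not; intro h; omega)]
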